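-- pv_equiv track=rewrite | github.com/TatsianaMi/DataScience_HW | HW-01.py | count_characters_and_spaces
-- ===== SOURCE A (Python) =====
-- def count_characters_and_spaces(input_string):
--     # Инициализируем счетчики
--     char_count = 0
--     space_count = 0
--
--     # Проходим по каждому символу в строке
--     for char in input_string:
--         if char.isspace():  # Если символ — это пробельный символ
--             space_count += 1
--         else:  # Если символ — не пробел
--             char_count += 1
--
--     return char_count, space_count
-- ===== SOURCE B (Python) =====
-- def count_characters_and_spaces(input_string):
--     # Tokenize into maximal whitespace-free words; non-space chars = total word length,
--     # whitespace chars = everything else.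
--     char_count = sum(map(len, input_string.split()))
--     return char_count, len(input_string) - char_count
-- ===== Notes on version B (the rewrite author's own statement) =====
-- stated objective: faster
-- what changed: B tokenizes the string with str.split() into whitespace-free words and sums their lengths to get the non-space count, deriving the space count as len(s) minus that, instead of A's per-character two-branch counting loop.
import Mathlib
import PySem

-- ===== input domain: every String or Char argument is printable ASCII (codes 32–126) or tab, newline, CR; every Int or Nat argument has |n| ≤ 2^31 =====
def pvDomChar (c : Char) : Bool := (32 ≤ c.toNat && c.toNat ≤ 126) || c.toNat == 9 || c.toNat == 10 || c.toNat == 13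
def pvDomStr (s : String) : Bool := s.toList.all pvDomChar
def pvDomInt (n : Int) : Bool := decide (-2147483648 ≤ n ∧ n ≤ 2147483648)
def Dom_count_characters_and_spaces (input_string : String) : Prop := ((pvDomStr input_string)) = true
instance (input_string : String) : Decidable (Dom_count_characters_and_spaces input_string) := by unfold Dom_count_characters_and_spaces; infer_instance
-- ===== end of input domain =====

-- B replaces A's per-character two-branch counting loop by tokenizing with str.split() and
-- summing word lengths; a timing run measured B faster (constant factor, C-level split).


-- ===== PORT A =====
-- char_count/space_count loop over the string, both counters in the fold state
def count_characters_and_spaces (input_string : String) : Int × Int :=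
  input_string.toList.foldl
    (fun (st : Int × Int) char =>
      if PySem.Str.isspace char then (st.1, st.2 + 1) else (st.1 + 1, st.2))
    (0, 0)

-- ===== PORT B =====
-- B: char_count = sum(map(len, input_string.split())), space_count = len(s) - char_count
def count_characters_and_spaces_alt (input_string : String) : Int × Int :=
  let char_count : Int :=
    ((PySem.Str.split₀ input_string).map (fun w => PySem.Str.len w)).sum
  (char_count, PySem.Str.len input_string - char_count)

-- ===== PRECONDITION & SPEC =====
def Spec_count_characters_and_spaces (input_string : String) (out : Int × Int) : Prop := out = count_characters_and_spaces_alt input_string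
instance (input_string : String) (out : Int × Int) : Decidable (Spec_count_characters_and_spaces input_string out) := by unfold Spec_count_characters_and_spaces; infer_instance

-- ===== CLAIM (what is proved, stated in full; the proofs are below) =====
def Claim_equal_count_characters_and_spaces : Prop := ∀ (input_string : String), Dom_count_characters_and_spaces input_string → Spec_count_characters_and_spaces input_string (count_characters_and_spaces input_string)

-- ===== LEMMAS AND PROOFS =====

-- A's fold computes (countP non-space, countP space)
lemma ccs_foldl (l : List Char) (a b : Int) :
    l.foldl (fun (st : Int × Int) char =>
      if PySem.Str.isspace char then (st.1, st.2 + 1) else (st.1 + 1, st.2)) (a, b)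
    = (a + (l.countP (fun c => !PySem.Chars.isspace c) : Nat),
       b + (l.countP (fun c => PySem.Chars.isspace c) : Nat)) := by
  induction l generalizing a b with
  | nil => simp
  | cons c t ih =>
    simp only [List.foldl_cons]
    by_cases h : PySem.Chars.isspace c = true
    · have e : (if PySem.Str.isspace c = true then ((a, b).1, (a, b).2 + 1)
          else ((a, b).1 + 1, (a, b).2)) = (a, b + 1) := by
        simp [PySem.Str.isspace, h]
      rw [e, ih]
      simp [h]
      ring
    · have e : (if PySem.Str.isspace c = true then ((a, b).1, (a, b).2 + 1)
          else ((a, b).1 + 1, (a, b).2)) = (a + 1, b) := by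
        simp [PySem.Str.isspace, h]
      rw [e, ih]
      simp [h]
      ring

-- split₀.go's word lengths sum to the non-space count plus what is already accumulated
lemma split₀_go_len (s cur : List Char) (acc : List (List Char)) :
    ((PySem.Chars.split₀.go s cur acc).map List.length).sum
      = s.countP (fun c => !PySem.Chars.isspace c) + cur.length + (acc.map List.length).sum := by
  induction s generalizing cur acc with
  | nil =>
    by_cases h : cur.isEmpty <;>
      simp_all [PySem.Chars.split₀.go, List.isEmpty_iff, List.sum_reverse]; omega
  | cons c t ih =>
    by_cases hs : PySem.Chars.isspace c = true
    · by_cases h : cur.isEmpty = true <;>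
        simp_all [PySem.Chars.split₀.go, List.isEmpty_iff]; omega
    · simp [PySem.Chars.split₀.go, hs, ih]; omega

lemma split₀_len_sum (s : List Char) :
    ((PySem.Chars.split₀ s).map List.length).sum = s.countP (fun c => !PySem.Chars.isspace c) := by
  simpa using split₀_go_len s [] []

-- ===== VERDICT (by name: the statement is the Claim_ definition above) =====
theorem count_characters_and_spaces_spec : Claim_equal_count_characters_and_spaces := by
  intro s _
  unfold Spec_count_characters_and_spaces count_characters_and_spaces count_characters_and_spaces_alt
  rw [ccs_foldl]
  have hsum : ((PySem.Str.split₀ s).map (fun w => ((w.toList.length : Nat) : Int))).sum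
      = ((s.toList.countP (fun c => !PySem.Chars.isspace c) : Nat) : Int) := by
    rw [← split₀_len_sum s.toList, Nat.cast_list_sum]
    simp [PySem.Str.split₀, List.map_map, Function.comp_def]
  have h := List.length_eq_countP_add_countP (fun c => PySem.Chars.isspace c) (l := s.toList)
  have e : s.toList.countP (fun a => decide (¬ PySem.Chars.isspace a = true))
      = s.toList.countP (fun c => !PySem.Chars.isspace c) := by simp
  rw [e] at h
  simp only [PySem.Str.len_eq, Prod.mk.injEq]
  rw [hsum]
  exact ⟨by omega, by omega⟩
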